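-- pv_equiv track=rewrite | github.com/pypi-data/pypi-mirror-92 | packages/hein-control/hein_control-6.3.2-py3-none-any.whl/hein_control/mixin/config.py | _update_args
-- ===== SOURCE A (Python) =====
-- def _update_args(original_args: tuple,
--                  new_args: tuple,
--                  ) -> tuple:
--     """
--     Updates the original argument tuple with the new arguments.
--
--     :param original_args: original argument tuple
--     :param new_args: new argument tuple
--     :return: updated argument tuple
--     """
--     original_args = list(original_args)
--     for ind, val in enumerate(new_args):
--         try:
--             original_args[ind] = val
--         except IndexError:
--             original_args.append(val)
--     return tuple(original_args)
-- ===== SOURCE B (Python) =====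
-- def _update_args(original_args: tuple,
--                  new_args: tuple,
--                  ) -> tuple:
--     """Merge argument tuples: new_args override the prefix, the rest of
--     original_args is kept."""
--     new_args = tuple(new_args)
--     return new_args + tuple(original_args)[len(new_args):]
-- ===== Notes on version B (the rewrite author's own statement) =====
-- stated objective: simpler
-- what changed: Replaced the element-wise overwrite loop with try/except IndexError by a single slice-and-concatenate expression: tuple(new_args) + tuple(original_args)[len(new_args):].
import Mathlib
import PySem

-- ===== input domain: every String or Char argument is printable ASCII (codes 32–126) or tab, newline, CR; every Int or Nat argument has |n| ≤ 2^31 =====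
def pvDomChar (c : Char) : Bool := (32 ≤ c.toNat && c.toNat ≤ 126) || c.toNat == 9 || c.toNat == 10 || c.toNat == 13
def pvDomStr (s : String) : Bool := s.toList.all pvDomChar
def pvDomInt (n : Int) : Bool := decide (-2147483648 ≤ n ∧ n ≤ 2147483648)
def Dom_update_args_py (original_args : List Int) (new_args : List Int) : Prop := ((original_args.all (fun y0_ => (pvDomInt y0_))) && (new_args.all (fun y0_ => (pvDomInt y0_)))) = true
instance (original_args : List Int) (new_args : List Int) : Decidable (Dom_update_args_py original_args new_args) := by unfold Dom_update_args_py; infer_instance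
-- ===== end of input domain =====

-- B replaces A's element-wise overwrite loop (with IndexError-append) by one
-- slice-and-concatenate expression; objective: simpler.

-- ===== PORT A =====
-- the 'for ind, val in enumerate(new_args)' loop: assignment in range, append past the end
def updLoopA (acc : List Int) (ind : Nat) (vals : List Int) : List Int :=
  match vals with
  | [] => acc
  | val :: rest =>
      updLoopA (if ind < acc.length then acc.set ind val else acc ++ [val]) (ind + 1) rest

def update_args_py (original_args : List Int) (new_args : List Int) : List Int :=
  updLoopA original_args 0 new_args

-- ===== PORT B =====
def update_args_py_alt (original_args : List Int) (new_args : List Int) : List Int :=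
  new_args ++ PySem.List.slice original_args (some (new_args.length : Int)) none

-- ===== PRECONDITION & SPEC =====
def Spec_update_args_py (original_args : List Int) (new_args : List Int) (out : List Int) : Prop := out = update_args_py_alt original_args new_args
instance (original_args : List Int) (new_args : List Int) (out : List Int) : Decidable (Spec_update_args_py original_args new_args out) := by unfold Spec_update_args_py; infer_instance

-- ===== CLAIM (what is proved, stated in full; the proofs are below) =====
def Claim_equal_update_args_py : Prop := ∀ (original_args : List Int) (new_args : List Int), Dom_update_args_py original_args new_args → Spec_update_args_py original_args new_args (update_args_py original_args new_args)

-- ===== LEMMAS AND PROOFS =====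

-- Loop invariant: with ind ≤ |acc|, the loop yields acc's prefix, then vals, then
-- acc's tail past ind + |vals|.
theorem updLoopA_eq (vals : List Int) (acc : List Int) (ind : Nat) (h : ind ≤ acc.length) :
    updLoopA acc ind vals = acc.take ind ++ vals ++ acc.drop (ind + vals.length) := by
  induction vals generalizing acc ind with
  | nil => simp [updLoopA]
  | cons v rest ih =>
    rw [updLoopA]
    by_cases hlt : ind < acc.length
    · rw [if_pos hlt, ih _ _ (by simp; omega), List.set_eq_take_cons_drop v hlt]
      simp [List.take_append, List.drop_append, List.take_take, List.drop_drop,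
        Nat.min_eq_left hlt.le, show ind + 1 - ind = 1 by omega,
        show ind + 1 + rest.length - ind = rest.length + 1 by omega,
        List.drop_eq_nil_of_le (show (List.take ind acc).length ≤ ind + 1 + rest.length by
          simp [List.length_take]; omega)]
      ring_nf
    · rw [if_neg hlt, ih _ _ (by simp; omega)]
      have hind : ind = acc.length := le_antisymm h (not_lt.mp hlt)
      subst hind
      simp [List.take_append, List.drop_append,
        List.take_of_length_le (show acc.length ≤ acc.length + 1 by omega),
        List.drop_eq_nil_of_le (show acc.length ≤ acc.length + 1 + rest.length by omega),
        show acc.length + 1 + rest.length - acc.length = rest.length + 1 by omega,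
        show acc.length + (rest.length + 1) = acc.length + 1 + rest.length by omega]

-- ===== VERDICT (by name: the statement is the Claim_ definition above) =====
theorem update_args_py_spec : Claim_equal_update_args_py := by
  intro o n _
  unfold Spec_update_args_py update_args_py update_args_py_alt
  rw [updLoopA_eq n o 0 (Nat.zero_le _), PySem.List.slice_from_natCast]
  simp
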